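-- pv_equiv track=rewrite | github.com/Mangutek/AOC2024 | day2.py | czysorted
-- ===== SOURCE A (Python) =====
-- def czysorted(list):
--     wynik = 0
--     wynik2 = 0
--     for i in range(len(list)-1):
--         if int(list[i])>int(list[i+1]):
--             wynik = wynik+1
--         elif int(list[i])<int(list[i+1]):
--
--             wynik2 = wynik2 + 1
--     if wynik == len(list)-1 or wynik2 == len(list)-1:
--         return 1
--     else:
--         return 0
-- ===== SOURCE B (Python) =====
-- def czysorted(list):
--     vals = [int(x) for x in list]
--     if not vals:
--         return 0
--     inc = sorted(set(vals))  # strictly increasing version of the values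
--     return 1 if vals == inc or vals == inc[::-1] else 0
-- ===== Notes on version B (the rewrite author's own statement) =====
-- stated objective: simpler
-- what changed: A's index loop maintaining two directional pair counters is replaced by a single comparison of the list against sorted(set(vals)) and its reversal (strictness comes for free from set dedup).
import Mathlib
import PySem

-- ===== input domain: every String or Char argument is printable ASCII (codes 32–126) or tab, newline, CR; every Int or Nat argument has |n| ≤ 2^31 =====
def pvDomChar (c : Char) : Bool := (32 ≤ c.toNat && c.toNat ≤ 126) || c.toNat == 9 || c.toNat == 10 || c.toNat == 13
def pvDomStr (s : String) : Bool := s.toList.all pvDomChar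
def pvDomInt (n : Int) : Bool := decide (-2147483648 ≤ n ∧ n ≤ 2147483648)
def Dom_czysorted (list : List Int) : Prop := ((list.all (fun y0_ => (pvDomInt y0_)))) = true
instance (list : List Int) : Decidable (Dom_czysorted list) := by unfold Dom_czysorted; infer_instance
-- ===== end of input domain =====

-- B replaces A's counter loop over adjacent indices by one comparison of the list against
-- sorted(set(vals)) and its reversal (objective: simpler).

-- ===== PORT A =====
-- literal port of A: loop over range(len(list)-1) keeping the two counters (wynik, wynik2);
-- int(x) on an int is the identity; indices i and i+1 are always in range here, so pyGetD's
-- default 0 is never used (exact)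
def czysorted (list : List Int) : Int :=
  let n : Int := (list.length : Int)
  let w :=
    (PySem.List.pyRange 0 (n - 1) 1).foldl
      (fun (w : Int × Int) i =>
        if PySem.List.pyGetD list i 0 > PySem.List.pyGetD list (i + 1) 0 then (w.1 + 1, w.2)
        else if PySem.List.pyGetD list i 0 < PySem.List.pyGetD list (i + 1) 0 then (w.1, w.2 + 1)
        else w)
      (0, 0)
  if w.1 = n - 1 ∨ w.2 = n - 1 then 1 else 0

-- ===== PORT B =====
-- literal port of B: vals = [int(x) for x in list] is the identity on List Int;
-- inc = sorted(set(vals)); inc[::-1] is inc.reverse (PySem.List.slice?_none_none_neg_one)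
def czysorted_alt (list : List Int) : Int :=
  if list = [] then 0
  else
    let inc := PySem.List.sorted (PySem.Set.ofList list) (fun x => x) false
    if list = inc ∨ list = inc.reverse then 1 else 0

-- ===== PRECONDITION & SPEC =====
def Spec_czysorted (list : List Int) (out : Int) : Prop := out = czysorted_alt list
instance (list : List Int) (out : Int) : Decidable (Spec_czysorted list out) := by unfold Spec_czysorted; infer_instance

-- ===== CLAIM (what is proved, stated in full; the proofs are below) =====
def Claim_equal_czysorted : Prop := ∀ (list : List Int), Dom_czysorted list → Spec_czysorted list (czysorted list)

-- ===== LEMMAS AND PROOFS =====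

-- a list whose members are exactly those of l equals sorted(set(l)) iff it is strictly increasing
theorem eq_sorted_set_iff (l m : List Int) (hm : ∀ x, x ∈ m ↔ x ∈ l) :
    m = PySem.List.sorted (PySem.Set.ofList l) (fun x => x) false ↔ m.Pairwise (· < ·) := by
  constructor
  · intro h; rw [h]; exact PySem.List.sorted_ofList_pairwise_lt l
  · intro h
    have hnd : m.Nodup := h.imp (fun hab => ne_of_lt hab)
    have hperm : m.Perm (PySem.Set.ofList l) :=
      (List.perm_ext_iff_of_nodup hnd (PySem.Set.nodup_ofList l)).mpr
        (fun x => (hm x).trans (PySem.Set.mem_ofList l x).symm)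
    exact (PySem.List.sorted_eq_of_perm_of_pairwise_lt _ _ _ hperm h).symm

-- A's counter reaches len(l)-1 iff every adjacent pair satisfies p
theorem count_full_iff (l : List Int) (p : Int → Int → Prop) [DecidableRel p] (hl : l ≠ []) :
    (((PySem.List.pyRange 0 ((l.length : Int) - 1) 1).countP
        (fun i => decide (p (PySem.List.pyGetD l i 0) (PySem.List.pyGetD l (i + 1) 0))) : Int)
      = (l.length : Int) - 1)
    ↔ List.IsChain p l := by
  have hne : 1 ≤ l.length := List.length_pos_iff.mpr hl
  have hlen : (PySem.List.pyRange 0 ((l.length : Int) - 1) 1).length = l.length - 1 := by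
    rw [PySem.List.length_pyRange_one]; omega
  have hle := List.countP_le_length (l := PySem.List.pyRange 0 ((l.length : Int) - 1) 1)
    (p := fun i => decide (p (PySem.List.pyGetD l i 0) (PySem.List.pyGetD l (i + 1) 0)))
  rw [List.isChain_iff_getElem]
  constructor
  · intro h k hk
    have hcnt : (PySem.List.pyRange 0 ((l.length : Int) - 1) 1).countP
        (fun i => decide (p (PySem.List.pyGetD l i 0) (PySem.List.pyGetD l (i + 1) 0)))
        = (PySem.List.pyRange 0 ((l.length : Int) - 1) 1).length := by omega
    have hall := List.countP_eq_length.mp hcnt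
    have hi : ((k : Int)) ∈ PySem.List.pyRange 0 ((l.length : Int) - 1) 1 := by
      rw [PySem.List.mem_pyRange_one]; constructor <;> omega
    have := hall _ hi
    simp only [decide_eq_true_iff] at this
    rwa [PySem.List.pyGetD_ofNat l k 0 (by omega),
      show ((k : Int) + 1) = ((k + 1 : Nat) : Int) by push_cast; ring,
      PySem.List.pyGetD_ofNat l (k + 1) 0 (by omega)] at this
  · intro h
    have hall : ∀ i ∈ PySem.List.pyRange 0 ((l.length : Int) - 1) 1,
        decide (p (PySem.List.pyGetD l i 0) (PySem.List.pyGetD l (i + 1) 0)) = true := by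
      intro i hi
      rw [PySem.List.mem_pyRange_one] at hi
      obtain ⟨h0, h1⟩ := hi
      have hk : i = ((i.toNat : Nat) : Int) := by omega
      have hk1 : i.toNat + 1 < l.length := by omega
      rw [hk, PySem.List.pyGetD_ofNat l i.toNat 0 (by omega),
        show ((i.toNat : Int) + 1) = ((i.toNat + 1 : Nat) : Int) by push_cast; ring,
        PySem.List.pyGetD_ofNat l (i.toNat + 1) 0 (by omega)]
      simpa using h i.toNat hk1
    have := List.countP_eq_length.mpr hall
    omega

-- A's value in closed form: 1 iff the list is nonempty and strictly monotone (either direction)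
theorem czysorted_closed (l : List Int) :
    czysorted l =
      if l ≠ [] ∧ (List.Pairwise (· < ·) l ∨ List.Pairwise (· > ·) l) then 1 else 0 := by
  by_cases hnil : l = []
  · subst hnil; decide
  · unfold czysorted
    have hstep : (fun (w : Int × Int) i =>
        if PySem.List.pyGetD l i 0 > PySem.List.pyGetD l (i + 1) 0 then (w.1 + 1, w.2)
        else if PySem.List.pyGetD l i 0 < PySem.List.pyGetD l (i + 1) 0 then (w.1, w.2 + 1)
        else w)
      = (fun (w : Int × Int) i =>
        ((fun (a : Int) i => if PySem.List.pyGetD l i 0 > PySem.List.pyGetD l (i + 1) 0 then a + 1 else a) w.1 i,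
         (fun (a : Int) i => if PySem.List.pyGetD l i 0 < PySem.List.pyGetD l (i + 1) 0 then a + 1 else a) w.2 i)) := by
      funext w i
      by_cases h1 : PySem.List.pyGetD l i 0 > PySem.List.pyGetD l (i + 1) 0 <;>
        by_cases h2 : PySem.List.pyGetD l i 0 < PySem.List.pyGetD l (i + 1) 0 <;>
        simp [h1, h2] <;> omega
    simp only [hstep]
    rw [PySem.List.foldl_prod_mk
      (f := fun (a : Int) i => if PySem.List.pyGetD l i 0 > PySem.List.pyGetD l (i + 1) 0 then a + 1 else a)
      (g := fun (a : Int) i => if PySem.List.pyGetD l i 0 < PySem.List.pyGetD l (i + 1) 0 then a + 1 else a)]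
    rw [PySem.List.foldl_ite_add_one, PySem.List.foldl_ite_add_one]
    simp only [zero_add]
    rw [if_congr (or_congr
        ((count_full_iff l (· > ·) hnil).trans List.isChain_iff_pairwise)
        ((count_full_iff l (· < ·) hnil).trans List.isChain_iff_pairwise)) rfl rfl]
    simp only [ne_eq, hnil, not_false_iff, true_and]
    exact if_congr or_comm rfl rfl

-- B's value in the same closed form
theorem czysorted_alt_closed (l : List Int) :
    czysorted_alt l =
      if l ≠ [] ∧ (List.Pairwise (· < ·) l ∨ List.Pairwise (· > ·) l) then 1 else 0 := by
  unfold czysorted_alt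
  by_cases hnil : l = []
  · simp [hnil]
  · have h1 := eq_sorted_set_iff l l (fun _ => Iff.rfl)
    have h2 : l = (PySem.List.sorted (PySem.Set.ofList l) (fun x => x) false).reverse ↔ l.Pairwise (· > ·) := by
      rw [← List.reverse_eq_iff]
      rw [eq_sorted_set_iff l l.reverse (fun x => List.mem_reverse)]
      exact List.pairwise_reverse
    have hcond := or_congr h1 h2
    simp only [ne_eq, hnil, not_false_iff, true_and, hcond]
    simp

-- ===== VERDICT (by name: the statement is the Claim_ definition above) =====
theorem czysorted_spec : Claim_equal_czysorted := by
  intro l _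
  unfold Spec_czysorted
  rw [czysorted_closed, czysorted_alt_closed]
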